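-- pv_equiv track=rewrite | github.com/afc1755/HFVL | bitFunctions.py | trunc_32
-- ===== SOURCE A (Python) =====
-- def trunc_32(in_byte):
--     in_byte = in_byte.replace(' ', '')
--     out_byte = ''
--     for i in range(0, len(in_byte)):
--         if i == 64:
--             return out_byte
--         out_byte += in_byte[i]
--         if (i + 1) % 2 == 0 and (i + 1) != len(in_byte):
--             out_byte += ' '
--     return out_byte
-- ===== SOURCE B (Python) =====
-- def trunc_32(in_byte):
--     s = in_byte.replace(' ', '')
--     pairs = [s[i:i + 2] for i in range(0, len(s), 2)]
--     return ' '.join(pairs)[:96]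
-- ===== Notes on version B (the rewrite author's own statement) =====
-- stated objective: simpler
-- what changed: Replaces A's char-by-char accumulation loop with index counter, modulo-2 spacing test and mid-loop early return by a direct decomposition: split the despaced string into 2-char chunks, join them with single spaces, and cut the result to 96 characters (which reproduces A's 64-char truncation including its trailing space).
import Mathlib
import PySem

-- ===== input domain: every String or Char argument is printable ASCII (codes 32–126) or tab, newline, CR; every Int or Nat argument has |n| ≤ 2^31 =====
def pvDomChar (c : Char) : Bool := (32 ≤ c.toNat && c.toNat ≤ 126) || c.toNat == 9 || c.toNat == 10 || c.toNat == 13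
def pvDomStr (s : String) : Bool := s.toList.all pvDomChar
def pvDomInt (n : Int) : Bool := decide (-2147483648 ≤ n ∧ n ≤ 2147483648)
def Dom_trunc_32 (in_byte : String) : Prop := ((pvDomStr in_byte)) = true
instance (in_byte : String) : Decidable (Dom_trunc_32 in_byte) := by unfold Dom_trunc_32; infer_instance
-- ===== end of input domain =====

-- B replaces A's char-by-char loop with modulo spacing by: chunk into pairs, join with ' ', cut to 96 chars (simpler decomposition, same cost).

-- ===== PORT A =====
-- A's for-loop: i is the current index, n = len(in_byte) after the replace, out is
-- out_byte; early return at i == 64; a space after every 2nd char unless at the end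
def truncLoopA : List Char → Nat → Nat → List Char → List Char
  | [], _, _, out => out
  | c :: rest, i, n, out =>
    if i = 64 then out
    else truncLoopA rest (i + 1) n
      (if (i + 1) % 2 = 0 ∧ (i + 1) ≠ n then out ++ [c] ++ [' '] else out ++ [c])

def trunc_32 (in_byte : String) : String :=
  let s := PySem.Str.replace in_byte " " ""
  String.ofList (truncLoopA s.toList 0 s.toList.length [])

-- ===== PORT B =====
-- the pairs comprehension [s[i:i+2] for i in range(0, len(s), 2)]: two chars per step
def pairsB : List Char → List (List Char)
  | [] => []
  | [c] => [[c]]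
  | a :: b :: r => [a, b] :: pairsB r

def trunc_32_alt (in_byte : String) : String :=
  let s := PySem.Str.replace in_byte " " ""
  String.ofList (List.take 96 (PySem.Chars.join [' '] (pairsB s.toList)))   -- ' '.join(pairs)[:96]

-- ===== PRECONDITION & SPEC =====
def Spec_trunc_32 (in_byte : String) (out : String) : Prop := out = trunc_32_alt in_byte
instance (in_byte : String) (out : String) : Decidable (Spec_trunc_32 in_byte out) := by unfold Spec_trunc_32; infer_instance

-- ===== CLAIM (what is proved, stated in full; the proofs are below) =====
def Claim_equal_trunc_32 : Prop := ∀ (in_byte : String), Dom_trunc_32 in_byte → Spec_trunc_32 in_byte (trunc_32 in_byte)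

-- ===== LEMMAS AND PROOFS =====

theorem pairsB_ne_nil (c : Char) (r : List Char) : pairsB (c :: r) ≠ [] := by
  match r with
  | [] => simp [pairsB]
  | d :: r' => simp [pairsB]

theorem join_pairs_cons (a b : Char) (r : List Char) (h : r ≠ []) :
    PySem.Chars.join [' '] (pairsB (a :: b :: r))
      = [a, b] ++ [' '] ++ PySem.Chars.join [' '] (pairsB r) := by
  obtain ⟨c, r', rfl⟩ := List.exists_cons_of_ne_nil h
  obtain ⟨p, ps, hp⟩ := List.exists_cons_of_ne_nil (pairsB_ne_nil c r')
  rw [show pairsB (a :: b :: c :: r') = [a, b] :: pairsB (c :: r') from rfl, hp,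
    PySem.Chars.join_cons_cons, ← hp]

-- one double step of A's loop: two chars consumed, a space appended unless at the end
theorem loopA_step (a b : Char) (r : List Char) (i n : Nat) (out : List Char)
    (he : i % 2 = 0) (hlt : i < 64) :
    truncLoopA (a :: b :: r) i n out
      = truncLoopA r (i + 2) n
          (if i + 2 = n then out ++ [a, b] else out ++ [a, b, ' ']) := by
  rw [truncLoopA, if_neg (by omega), if_neg (by omega),
      truncLoopA, if_neg (by omega)]
  by_cases hn : i + 1 + 1 = n
  · rw [if_neg (by omega), if_pos (by omega)]
    have h2 : i + 1 + 1 = i + 2 := by omega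
    rw [h2]; simp
  · rw [if_pos (by omega), if_neg (by omega)]
    have h2 : i + 1 + 1 = i + 2 := by omega
    rw [h2]; simp

-- A's loop when everything fits (n ≤ 64): out ++ the joined pairs
theorem loopA_small (r : List Char) : ∀ (i n : Nat) (out : List Char),
    i % 2 = 0 → n = i + r.length → n ≤ 64 →
    truncLoopA r i n out = out ++ PySem.Chars.join [' '] (pairsB r) := by
  induction r using pairsB.induct with
  | case1 =>
    intro i n out _ _ _
    simp [truncLoopA, pairsB, PySem.Chars.join_nil]
  | case2 c =>
    intro i n out he hn hle
    simp only [List.length_cons, List.length_nil] at hn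
    rw [truncLoopA, if_neg (by omega), if_neg (by omega)]
    simp [truncLoopA, pairsB, PySem.Chars.join_singleton]
  | case3 a b r ih =>
    intro i n out he hn hle
    simp only [List.length_cons] at hn
    rw [loopA_step a b r i n out he (by omega)]
    cases r with
    | nil =>
      rw [if_pos (by simp at hn ⊢; omega)]
      simp [truncLoopA, pairsB, PySem.Chars.join_singleton]
    | cons c r' =>
      rw [if_neg (by simp at hn ⊢; omega)]
      rw [ih (i + 2) n (out ++ [a, b, ' ']) (by omega) (by simp at hn ⊢; omega) hle]
      rw [join_pairs_cons a b (c :: r') (by simp)]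
      simp

-- A's loop when the input overshoots (n > 64): out ++ the first 96 - 3*(i/2) chars of the join
theorem loopA_big (r : List Char) : ∀ (i n : Nat) (out : List Char),
    i % 2 = 0 → i ≤ 64 → n = i + r.length → 64 < n →
    truncLoopA r i n out
      = out ++ List.take (96 - 3 * (i / 2)) (PySem.Chars.join [' '] (pairsB r)) := by
  induction r using pairsB.induct with
  | case1 =>
    intro i n out _ _ hn hbig
    simp only [List.length_nil] at hn
    omega
  | case2 c =>
    intro i n out he hle hn hbig
    simp only [List.length_cons, List.length_nil] at hn
    have h64 : i = 64 := by omega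
    subst h64
    rw [truncLoopA, if_pos rfl]
    norm_num
  | case3 a b r ih =>
    intro i n out he hle hn hbig
    simp only [List.length_cons] at hn
    by_cases h64 : i = 64
    · subst h64
      rw [truncLoopA, if_pos rfl]
      norm_num
    · have hr : r ≠ [] := by
        intro hnil
        subst hnil
        simp at hn
        omega
      obtain ⟨c, r', rfl⟩ := List.exists_cons_of_ne_nil hr
      rw [loopA_step a b (c :: r') i n out he (by omega)]
      rw [if_neg (by simp at hn ⊢; omega)]
      rw [ih (i + 2) n (out ++ [a, b, ' ']) (by omega) (by omega)
            (by simp at hn ⊢; omega) hbig]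
      rw [join_pairs_cons a b (c :: r') (by simp)]
      have h3 : 96 - 3 * (i / 2) = 3 + (96 - 3 * ((i + 2) / 2)) := by omega
      rw [h3]
      simp [List.take_add]

-- the joined pairs of r have at most |r| + |r|/2 characters (64 chars → at most 95)
theorem joinPairs_length_le (r : List Char) :
    (PySem.Chars.join [' '] (pairsB r)).length ≤ r.length + r.length / 2 := by
  induction r using pairsB.induct with
  | case1 => simp [pairsB, PySem.Chars.join_nil]
  | case2 c => simp [pairsB, PySem.Chars.join_singleton]
  | case3 a b r ih =>
    cases r with
    | nil => simp [pairsB, PySem.Chars.join_singleton]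
    | cons c r' =>
      rw [join_pairs_cons a b (c :: r') (by simp)]
      have hih := ih
      simp only [List.length_append, List.length_cons, List.length_nil] at hih ⊢
      omega

-- ===== VERDICT (by name: the statement is the Claim_ definition above) =====
theorem trunc_32_spec : Claim_equal_trunc_32 := by
  intro in_byte _
  unfold Spec_trunc_32 trunc_32 trunc_32_alt
  dsimp only
  set cs := (PySem.Str.replace in_byte " " "").toList with hcs
  by_cases h : cs.length ≤ 64
  · rw [loopA_small cs 0 cs.length [] (by omega) (by omega) h]
    rw [List.take_of_length_le (by have := joinPairs_length_le cs; omega)]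
    simp
  · rw [loopA_big cs 0 cs.length [] (by omega) (by omega) (by omega) (by omega)]
    norm_num
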